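-- pv_equiv track=rewrite | github.com/jackjohnson-sd/wwmdd | overlap.py | _overlap_stints
-- ===== SOURCE A (Python) =====
-- def overlap(stintA, stintB):
--
--     A_start = stintA[1]
--     A_end   = stintA[2]
--     B_start = stintB[1]
--     B_end   = stintB[2]
--
--     overlap_start = [
--         A_start,
--         A_start,
--         A_start,
--         B_start,
--         B_start,
--         B_start,
--         A_start,
--         A_start,
--         A_start,]
--
--     overlap_length = [
--     A_end - A_start,
--     A_end - A_start,
--     B_end - A_start,
--     A_end - B_start,
--     A_end - B_start,
--     B_end - B_start,
--     A_end - A_start,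
--     A_end - A_start,
--     B_end - A_start,]
--
--     index = 0
--
--     if   A_start < B_start:  index = 3
--     elif A_start > B_start:  index = 6
--
--     if   A_end < B_end:   index += 1
--     elif A_end > B_end:   index += 2
--
--     OVLP_start = overlap_start[index]
--     OVLP_end   = overlap_length[index]
--
--     return OVLP_start, OVLP_end
--
-- def _overlap_stints(pa_stints, pb_stints):
--
--     ovelap_stints_by_player = []
--     for stintsa in pa_stints:
--         for stintsb in pb_stints:
--             if stintsa[3] == stintsb[3]:
--                 os,ol = overlap(stintsa,stintsb)
--                 if ol > 0:
--                     ovelap_stints_by_player.extend([[ol, os, os+ol,stintsa[3]]])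
--     return ovelap_stints_by_player
-- ===== SOURCE B (Python) =====
-- def _overlap_stints(pa_stints, pb_stints):
--     result = []
--     if not pa_stints or not pb_stints:
--         return result
--     # index pb_stints by key once, preserving order within each group
--     groups = {}
--     for sb in pb_stints:
--         groups.setdefault(sb[3], []).append(sb)
--     for sa in pa_stints:
--         a_start, a_end, key = sa[1], sa[2], sa[3]
--         for sb in groups.get(key, ()):
--             os = a_start if a_start >= sb[1] else sb[1]
--             oe = a_end if a_end <= sb[2] else sb[2]
--             ol = oe - os
--             if ol > 0:
--                 result.append([ol, os, oe, key])
--     return result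
-- ===== Notes on version B (the rewrite author's own statement) =====
-- stated objective: faster
-- what changed: B replaces A's all-pairs nested scan over pa_stints x pb_stints with a single pass that groups pb_stints by key in a dict, then visits only the matching group per pa stint, and replaces the nine-entry lookup tables of overlap() with the direct max(start)/min(end) formula.
import Mathlib
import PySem

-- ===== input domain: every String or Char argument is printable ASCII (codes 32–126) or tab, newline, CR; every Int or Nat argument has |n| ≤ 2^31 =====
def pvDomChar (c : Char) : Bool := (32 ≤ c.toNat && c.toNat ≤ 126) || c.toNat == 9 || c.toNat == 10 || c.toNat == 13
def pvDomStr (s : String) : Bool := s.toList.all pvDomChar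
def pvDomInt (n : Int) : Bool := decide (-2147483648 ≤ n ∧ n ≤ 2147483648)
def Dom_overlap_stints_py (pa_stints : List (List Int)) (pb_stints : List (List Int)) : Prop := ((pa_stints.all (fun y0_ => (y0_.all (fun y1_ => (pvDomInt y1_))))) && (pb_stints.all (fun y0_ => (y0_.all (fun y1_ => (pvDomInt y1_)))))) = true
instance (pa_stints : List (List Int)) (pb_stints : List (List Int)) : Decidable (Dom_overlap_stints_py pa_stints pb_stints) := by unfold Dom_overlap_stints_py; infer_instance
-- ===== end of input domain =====

-- B replaces A's O(n*m) all-pairs scan by a one-pass grouping of pb_stints by key plus a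
-- direct max/min overlap formula in place of A's nine-entry lookup tables (objective: faster).

-- ===== PORT A =====
-- port of the helper `overlap` (table-based); indices are in range under Pre_, so pyGetD with default 0 is exact there
def pvOverlapA (stintA stintB : List Int) : Int × Int :=
  let A_start := PySem.List.pyGetD stintA 1 0
  let A_end   := PySem.List.pyGetD stintA 2 0
  let B_start := PySem.List.pyGetD stintB 1 0
  let B_end   := PySem.List.pyGetD stintB 2 0
  let overlap_start : List Int :=
    [A_start, A_start, A_start, B_start, B_start, B_start, A_start, A_start, A_start]
  let overlap_length : List Int :=
    [A_end - A_start, A_end - A_start, B_end - A_start,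
     A_end - B_start, A_end - B_start, B_end - B_start,
     A_end - A_start, A_end - A_start, B_end - A_start]
  let index : Int := if A_start < B_start then 3 else if A_start > B_start then 6 else 0
  let index : Int := if A_end < B_end then index + 1 else if A_end > B_end then index + 2 else index
  (PySem.List.pyGetD overlap_start index 0, PySem.List.pyGetD overlap_length index 0)

def overlap_stints_py (pa_stints : List (List Int)) (pb_stints : List (List Int)) : List (List Int) :=
  pa_stints.foldl (fun acc stintsa =>
    pb_stints.foldl (fun acc stintsb =>
      if PySem.List.pyGetD stintsa 3 0 == PySem.List.pyGetD stintsb 3 0 then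
        let p := pvOverlapA stintsa stintsb
        if p.2 > 0 then
          acc ++ [[p.2, p.1, p.1 + p.2, PySem.List.pyGetD stintsa 3 0]]
        else acc
      else acc) acc) []

-- ===== PORT B =====
def overlap_stints_py_alt (pa_stints : List (List Int)) (pb_stints : List (List Int)) : List (List Int) :=
  if pa_stints.isEmpty || pb_stints.isEmpty then []
  else
    let groups : PySem.Dict Int (List (List Int)) :=
      pb_stints.foldl (fun g sb => g.modify (PySem.List.pyGetD sb 3 0) [] (· ++ [sb])) PySem.Dict.empty
    pa_stints.foldl (fun acc sa =>
      let a_start := PySem.List.pyGetD sa 1 0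
      let a_end   := PySem.List.pyGetD sa 2 0
      let key     := PySem.List.pyGetD sa 3 0
      (groups.getD key []).foldl (fun acc sb =>
        let os := if a_start ≥ PySem.List.pyGetD sb 1 0 then a_start else PySem.List.pyGetD sb 1 0
        let oe := if a_end ≤ PySem.List.pyGetD sb 2 0 then a_end else PySem.List.pyGetD sb 2 0
        if oe - os > 0 then acc ++ [[oe - os, os, oe, key]] else acc) acc) []

-- ===== PRECONDITION & SPEC =====
-- Pre_ = exactly the inputs on which the Python A returns: with both lists nonempty, A reads
-- stint[3] (and on a key match stint[1], stint[2]) of every stint, raising IndexError on a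
-- stint shorter than 4; if either list is empty those reads never happen and A returns [].
def Pre_overlap_stints_py (pa_stints : List (List Int)) (pb_stints : List (List Int)) : Prop :=
  pa_stints = [] ∨ pb_stints = [] ∨
    ((∀ s ∈ pa_stints, 4 ≤ s.length) ∧ (∀ s ∈ pb_stints, 4 ≤ s.length))
instance (pa_stints : List (List Int)) (pb_stints : List (List Int)) : Decidable (Pre_overlap_stints_py pa_stints pb_stints) := by unfold Pre_overlap_stints_py; infer_instance
def pvWitness_overlap_stints_py : List (List Int) × List (List Int) :=
  ([[0, 0, 3, 7], [0, 5, 9, 8]], [[0, 1, 4, 7], [0, 2, 6, 8]])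

def Spec_overlap_stints_py (pa_stints : List (List Int)) (pb_stints : List (List Int)) (out : List (List Int)) : Prop := out = overlap_stints_py_alt pa_stints pb_stints
instance (pa_stints : List (List Int)) (pb_stints : List (List Int)) (out : List (List Int)) : Decidable (Spec_overlap_stints_py pa_stints pb_stints out) := by unfold Spec_overlap_stints_py; infer_instance

-- ===== CLAIM (what is proved, stated in full; the proofs are below) =====
def Claim_equal_overlap_stints_py : Prop := ∀ (pa_stints : List (List Int)) (pb_stints : List (List Int)), Dom_overlap_stints_py pa_stints pb_stints → Pre_overlap_stints_py pa_stints pb_stints → Spec_overlap_stints_py pa_stints pb_stints (overlap_stints_py pa_stints pb_stints)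

-- ===== LEMMAS AND PROOFS =====

-- A's table lookup computes exactly B's max/min overlap formula
lemma pvTable (a1 a2 b1 b2 : Int) :
    (let overlap_start : List Int := [a1, a1, a1, b1, b1, b1, a1, a1, a1]
     let overlap_length : List Int :=
       [a2 - a1, a2 - a1, b2 - a1, a2 - b1, a2 - b1, b2 - b1, a2 - a1, a2 - a1, b2 - a1]
     let index : Int := if a1 < b1 then 3 else if a1 > b1 then 6 else 0
     let index : Int := if a2 < b2 then index + 1 else if a2 > b2 then index + 2 else index
     (PySem.List.pyGetD overlap_start index 0, PySem.List.pyGetD overlap_length index 0))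
    = ((if a1 ≥ b1 then a1 else b1),
       (if a2 ≤ b2 then a2 else b2) - (if a1 ≥ b1 then a1 else b1)) := by
  rcases lt_trichotomy a1 b1 with h1 | h1 | h1 <;> rcases lt_trichotomy a2 b2 with h2 | h2 | h2 <;>
    simp only [h1, h2, gt_iff_lt, if_pos, lt_irrefl, asymm] <;>
    norm_num [h1, h2, le_of_lt, not_lt.mpr, PySem.List.pyGetD_ofNat'] <;> omega

lemma pvOverlapA_closed (sa sb : List Int) :
    pvOverlapA sa sb =
      ((if PySem.List.pyGetD sa 1 0 ≥ PySem.List.pyGetD sb 1 0 then PySem.List.pyGetD sa 1 0 else PySem.List.pyGetD sb 1 0),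
       (if PySem.List.pyGetD sa 2 0 ≤ PySem.List.pyGetD sb 2 0 then PySem.List.pyGetD sa 2 0 else PySem.List.pyGetD sb 2 0) -
       (if PySem.List.pyGetD sa 1 0 ≥ PySem.List.pyGetD sb 1 0 then PySem.List.pyGetD sa 1 0 else PySem.List.pyGetD sb 1 0)) := by
  unfold pvOverlapA
  exact pvTable (PySem.List.pyGetD sa 1 0) (PySem.List.pyGetD sa 2 0)
    (PySem.List.pyGetD sb 1 0) (PySem.List.pyGetD sb 2 0)

-- the grouping fold looked up at k is the filter of pb_stints by key k
lemma groups_getD (pb : List (List Int)) (k : Int) :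
    ((pb.foldl (fun g sb => g.modify (PySem.List.pyGetD sb 3 0) [] (· ++ [sb])) PySem.Dict.empty).getD k []) =
      pb.filter (fun sb => PySem.List.pyGetD sb 3 0 == k) := by
  have h := PySem.Dict.getD_foldl_modify_append
    (l := pb.map (fun sb => (PySem.List.pyGetD sb 3 0, sb)))
    (d := (PySem.Dict.empty : PySem.Dict Int (List (List Int)))) (c := k)
  rw [List.foldl_map] at h
  rw [h, PySem.Dict.getD_empty, List.filter_map]
  simp [List.map_map, Function.comp_def]

-- ===== VERDICT (by name: the statement is the Claim_ definition above) =====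
theorem overlap_stints_py_spec : Claim_equal_overlap_stints_py := by
  intro pa pb _ _
  unfold Spec_overlap_stints_py overlap_stints_py overlap_stints_py_alt
  rcases pa with _ | ⟨a0, pas⟩
  · simp
  rcases pb with _ | ⟨b0, pbs⟩
  · simp
  rw [if_neg (by simp)]
  apply PySem.List.foldl_congr_mem
  intro acc sa _
  simp only [ge_iff_le, gt_iff_lt]
  rw [groups_getD, List.foldl_filter]
  apply PySem.List.foldl_congr_mem
  intro acc' sb _
  by_cases hk : PySem.List.pyGetD sa 3 0 = PySem.List.pyGetD sb 3 0
  · rw [if_pos (by simpa using hk), pvOverlapA_closed]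
    split_ifs with h <;> simp_all
  · rw [if_neg (by simpa using hk), if_neg (by simpa using fun he => hk he.symm)]
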